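-- pv_equiv track=rewrite | github.com/XWRI/--Rush-Hour-- | rushhour.py | find_vehicle_vertical
-- ===== SOURCE A (Python) =====
-- def find_vehicle_vertical(index, board_string):
--     board = construct_board(board_string)
--     row = int(index / 6)
--     col = int(index % 6)
--     # Creates a list storing the starting and ending position
--     res_pos = []
--     up = row
--     down = row
--
--     # Finds the starting position
--     while (up >= 0 and board[up][col] == board[row][col]):
--         up -= 1
--
--     # Adding the starting coordinates of the vehicle
--     if (up >= 0 and board[up][col] == board[row][col]):
--         res_pos.append(up)
--     else: res_pos.append(up+1)
--     res_pos.append(col)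
--
--     # Finds the ending position
--     while (down < len(board) and board[down][col] == board[row][col]):
--         down += 1
--
--     # Adding the ending coordinates of the vehicle
--     if (down < len(board) and board[down][col] == board[row][col]):
--         res_pos.append(down)
--     else: res_pos.append(down-1)
--     res_pos.append(col)
--
--     return res_pos
--
-- def construct_board(string):
--     board = [] * 6
--     for i in range(0, len(string)):
--         if i % 6 == 0:
--             new_row = [] * 6
--             new_row.append(string[i])
--         elif i % 6 == 5:
--             new_row.append(string[i])
--             board.append(new_row)
--         else:
--             new_row.append(string[i])
--     return board
-- ===== SOURCE B (Python) =====
-- def find_vehicle_vertical(index, board_string):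
--     board = construct_board(board_string)
--     row = int(index / 6)
--     col = int(index % 6)
--     # Build the whole column once, segment it into maximal equal-character
--     # runs, then pick the run that contains `row`.
--     column = [board[r][col] for r in range(len(board))]
--     runs = []
--     for ch in column:
--         if runs and runs[-1][0] == ch:
--             runs[-1][1] += 1
--         else:
--             runs.append([ch, 1])
--     start = 0
--     for ch, length in runs:
--         if start <= row < start + length:
--             return [start, col, start + length - 1, col]
--         start += length
--
-- def construct_board(string):
--     board = [] * 6
--     for i in range(0, len(string)):
--         if i % 6 == 0:
--             new_row = [] * 6
--             new_row.append(string[i])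
--         elif i % 6 == 5:
--             new_row.append(string[i])
--             board.append(new_row)
--         else:
--             new_row.append(string[i])
--     return board
-- ===== Notes on version B (the rewrite author's own statement) =====
-- stated objective: alternative
-- what changed: Replaces A's two outward adjustment scans (up/down from row with post-loop off-by-one fixups) by building the column once, run-length-segmenting it into maximal equal runs, and selecting the run containing row.
-- outside the precondition, e.g. on find_vehicle_vertical(-7, 'ABCDEFGHIJKL'): A returns [0, 5, -1, 5], B returns None
import Mathlib
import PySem

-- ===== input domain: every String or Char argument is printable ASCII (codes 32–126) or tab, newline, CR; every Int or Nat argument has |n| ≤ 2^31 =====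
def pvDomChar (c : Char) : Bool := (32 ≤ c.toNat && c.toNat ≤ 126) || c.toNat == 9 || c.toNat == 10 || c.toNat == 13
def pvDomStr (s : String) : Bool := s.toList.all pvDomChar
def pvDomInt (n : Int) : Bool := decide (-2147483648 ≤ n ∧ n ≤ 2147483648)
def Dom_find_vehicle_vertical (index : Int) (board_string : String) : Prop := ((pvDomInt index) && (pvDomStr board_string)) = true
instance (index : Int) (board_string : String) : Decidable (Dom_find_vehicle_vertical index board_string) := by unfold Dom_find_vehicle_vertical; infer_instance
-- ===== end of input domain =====

-- B replaces A's two outward adjustment-and-fixup scans by run-length segmentation of the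
-- column plus a selection pass (objective: alternative decomposition, same cost).

-- ===== PORT A =====

-- board[r][c] (Python indexing; totalised with defaults — under Pre_ every access is in range)
def pvCell (board : List (List Char)) (r c : Int) : Char :=
  PySem.List.pyGetD ((PySem.List.pyGet? board r).getD []) c ' '

-- construct_board: fold over range(len(string)) carrying (board, new_row); shared helper of A and B
-- (Source B keeps A's construct_board verbatim)
def pvConstruct (s : List Char) : List (List Char) :=
  ((List.range s.length).foldl
    (fun (st : List (List Char) × List Char) i =>
      if i % 6 == 0 then (st.1, [s.getD i ' '])
      else if i % 6 == 5 then (st.1 ++ [st.2 ++ [s.getD i ' ']], st.2 ++ [s.getD i ' '])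
      else (st.1, st.2 ++ [s.getD i ' '])) ([], [])).1

-- while (up >= 0 and board[up][col] == target): up -= 1
def pvUp (board : List (List Char)) (c : Int) (t : Char) (u : Int) : Int :=
  if h : 0 ≤ u ∧ pvCell board u c = t then pvUp board c t (u - 1) else u
termination_by (u + 1).toNat
decreasing_by omega

-- while (down < len(board) and board[down][col] == target): down += 1
def pvDown (board : List (List Char)) (n : Int) (c : Int) (t : Char) (d : Int) : Int :=
  if h : d < n ∧ pvCell board d c = t then pvDown board n c t (d + 1) else d
termination_by (n - d).toNat
decreasing_by omega

def find_vehicle_vertical (index : Int) (board_string : String) : List Int :=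
  let board := pvConstruct board_string.toList
  let row := Int.tdiv index 6          -- int(index / 6): truncating division (exact for |index| ≤ 2^31)
  let col := PySem.Int.mod index 6     -- int(index % 6)
  let up := pvUp board col (pvCell board row col) row
  let down := pvDown board (board.length : Int) col (pvCell board row col) row
  let s := if 0 ≤ up ∧ pvCell board up col = pvCell board row col then up else up + 1
  let e := if down < (board.length : Int) ∧ pvCell board down col = pvCell board row col then down else down - 1
  [s, col, e, col]

-- ===== PORT B =====

-- run-length accumulator: if runs and runs[-1][0] == ch: runs[-1][1] += 1 else append [ch, 1]
def pvAddRun (runs : List (Char × Int)) (ch : Char) : List (Char × Int) :=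
  match runs.getLast? with
  | some lastr => if lastr.1 = ch then runs.dropLast ++ [(lastr.1, lastr.2 + 1)] else runs ++ [(ch, 1)]
  | none => runs ++ [(ch, 1)]

-- for ch, length in runs: if start <= row < start + length: return [...]; start += length
-- (falling off the loop: Python returns None, the port returns [])
def pvSelRuns (row col : Int) : List (Char × Int) → Int → List Int
  | [], _ => []
  | (_, len) :: rest, start =>
    if start ≤ row ∧ row < start + len then [start, col, start + len - 1, col]
    else pvSelRuns row col rest (start + len)

def find_vehicle_vertical_alt (index : Int) (board_string : String) : List Int :=
  let board := pvConstruct board_string.toList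
  let row := Int.tdiv index 6
  let col := PySem.Int.mod index 6
  let column := (List.range board.length).map (fun r => pvCell board (Int.ofNat r) col)
  let runs := column.foldl pvAddRun []
  pvSelRuns row col runs 0

-- ===== PRECONDITION & SPEC =====

-- Pre_ excludes (a) indices ≥ 6*(len//6), where A raises IndexError on board[up][col], and
-- (b) indices ≤ -6, where A's value comes from Python's negative-index wraparound on
-- board[down] (an accident of A's implementation yielding e.g. [0, 5, -1, 5]).
-- Indices -5..-1 stay inside: there int(index/6) = 0 and A behaves like index + 6
-- (the last conjunct demands a nonempty board, without which A raises on them).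
def Pre_find_vehicle_vertical (index : Int) (board_string : String) : Prop :=
  -6 < index ∧ index < 6 * ((board_string.toList.length / 6 : Nat) : Int) ∧
    0 < board_string.toList.length / 6
instance (index : Int) (board_string : String) : Decidable (Pre_find_vehicle_vertical index board_string) := by
  unfold Pre_find_vehicle_vertical; infer_instance

def pvWitness_find_vehicle_vertical : Int × String := (7, "AB.AB.AB.CC.")

def Spec_find_vehicle_vertical (index : Int) (board_string : String) (out : List Int) : Prop := out = find_vehicle_vertical_alt index board_string
instance (index : Int) (board_string : String) (out : List Int) : Decidable (Spec_find_vehicle_vertical index board_string out) := by unfold Spec_find_vehicle_vertical; infer_instance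

-- ===== CLAIM (what is proved, stated in full; the proofs are below) =====
def Claim_equal_find_vehicle_vertical : Prop := ∀ (index : Int) (board_string : String), Dom_find_vehicle_vertical index board_string → Pre_find_vehicle_vertical index board_string → Spec_find_vehicle_vertical index board_string (find_vehicle_vertical index board_string)

-- ===== LEMMAS AND PROOFS =====

-- "maximal equal run of m around position p spans [s, e]"
def pvRunAt (m : List Char) (p s e : Nat) : Prop :=
  s ≤ p ∧ p ≤ e ∧ e < m.length ∧
  (∀ i, s ≤ i → i ≤ e → m.getD i ' ' = m.getD p ' ') ∧
  (s = 0 ∨ m.getD (s - 1) ' ' ≠ m.getD p ' ') ∧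
  (e + 1 = m.length ∨ m.getD (e + 1) ' ' ≠ m.getD p ' ')

def pvDecode (runs : List (Char × Int)) : List Char :=
  runs.flatMap (fun r => List.replicate r.2.toNat r.1)

def pvInv (runs : List (Char × Int)) : Prop :=
  (∀ x ∈ runs, 1 ≤ x.2) ∧ List.IsChain (fun a b => a ≠ b) (runs.map Prod.fst)

theorem pvRunAt_unique {m : List Char} {p s1 e1 s2 e2 : Nat}
    (h1 : pvRunAt m p s1 e1) (h2 : pvRunAt m p s2 e2) : s1 = s2 ∧ e1 = e2 := by
  obtain ⟨hs1, hp1, he1, hin1, hl1, hr1⟩ := h1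
  obtain ⟨hs2, hp2, he2, hin2, hl2, hr2⟩ := h2
  constructor
  · rcases Nat.lt_trichotomy s1 s2 with h | h | h
    · have := hin1 (s2 - 1) (by omega) (by omega)
      rcases hl2 with h0 | hne
      · omega
      · exact absurd this hne
    · exact h
    · have := hin2 (s1 - 1) (by omega) (by omega)
      rcases hl1 with h0 | hne
      · omega
      · exact absurd this hne
  · rcases Nat.lt_trichotomy e1 e2 with h | h | h
    · have := hin2 (e1 + 1) (by omega) (by omega)
      rcases hr1 with h0 | hne
      · omega
      · exact absurd this hne
    · exact h
    · have := hin1 (e2 + 1) (by omega) (by omega)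
      rcases hr2 with h0 | hne
      · omega
      · exact absurd this hne

theorem pvUp_spec (board : List (List Char)) (c : Int) (t : Char) (u : Int) :
    pvUp board c t u ≤ u ∧ (-1 ≤ u → -1 ≤ pvUp board c t u) ∧
    (0 ≤ pvUp board c t u → pvCell board (pvUp board c t u) c ≠ t) ∧
    (∀ v, pvUp board c t u < v → v ≤ u → pvCell board v c = t) := by
  induction u using pvUp.induct board c t with
  | case1 u h ih =>
    rw [pvUp, dif_pos h]
    obtain ⟨ih1, ih2, ih3, ih4⟩ := ih
    refine ⟨by omega, by omega, ih3, ?_⟩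
    intro v hv1 hv2
    rcases eq_or_lt_of_le hv2 with rfl | hlt
    · exact h.2
    · exact ih4 v hv1 (by omega)
  | case2 u h =>
    rw [pvUp, dif_neg h]
    refine ⟨le_refl _, by omega, ?_, by omega⟩
    intro h0 hc
    exact h ⟨h0, hc⟩

theorem pvDown_spec (board : List (List Char)) (n c : Int) (t : Char) (d : Int) :
    d ≤ pvDown board n c t d ∧ (d ≤ n → pvDown board n c t d ≤ n) ∧
    (pvDown board n c t d < n → pvCell board (pvDown board n c t d) c ≠ t) ∧
    (∀ v, d ≤ v → v < pvDown board n c t d → pvCell board v c = t) := by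
  induction d using pvDown.induct board n c t with
  | case1 d h ih =>
    rw [pvDown, dif_pos h]
    obtain ⟨ih1, ih2, ih3, ih4⟩ := ih
    refine ⟨by omega, fun _ => ih2 (by omega), ih3, ?_⟩
    intro v hv1 hv2
    rcases eq_or_lt_of_le hv1 with rfl | hlt
    · exact h.2
    · exact ih4 v (by omega) hv2
  | case2 d h =>
    rw [pvDown, dif_neg h]
    refine ⟨le_refl _, fun h => h, ?_, by omega⟩
    intro h0 hc
    exact h ⟨h0, hc⟩

theorem pvAddRun_spec (runs : List (Char × Int)) (ch : Char) (h : pvInv runs) :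
    pvInv (pvAddRun runs ch) ∧ pvDecode (pvAddRun runs ch) = pvDecode runs ++ [ch] := by
  obtain ⟨hmem, hchain⟩ := h
  match hL : runs.getLast? with
  | none =>
    have hnil : runs = [] := List.getLast?_eq_none_iff.mp hL
    subst hnil
    refine ⟨⟨?_, ?_⟩, ?_⟩ <;> simp [pvAddRun, pvDecode]
  | some lastr =>
    have hne : runs ≠ [] := by
      intro hh; rw [hh] at hL; simp at hL
    have hL' : runs.getLast hne = lastr := by
      have := List.getLast?_eq_some_getLast hne
      rw [hL] at this; exact (Option.some_inj.mp this).symm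
    have hsplit : runs.dropLast ++ [lastr] = runs := by
      rw [← hL']; exact List.dropLast_concat_getLast hne
    have hlast1 : 1 ≤ lastr.2 := hmem lastr (by rw [← hsplit]; simp)
    by_cases hc : lastr.1 = ch
    · have hres : pvAddRun runs ch = runs.dropLast ++ [(lastr.1, lastr.2 + 1)] := by
        rw [pvAddRun, hL]; simp [hc]
      refine ⟨⟨?_, ?_⟩, ?_⟩
      · intro x hx
        rw [hres] at hx
        rcases List.mem_append.mp hx with hx | hx
        · exact hmem x (List.dropLast_subset _ hx)
        · simp at hx; subst hx; omega
      · rw [hres]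
        have : (runs.dropLast ++ [(lastr.1, lastr.2 + 1)]).map Prod.fst = runs.map Prod.fst := by
          conv_rhs => rw [← hsplit]
          simp
        rw [this]; exact hchain
      · rw [hres]
        conv_rhs => rw [← hsplit]
        have h1 : (lastr.2 + 1).toNat = lastr.2.toNat + 1 := by omega
        simp [pvDecode, h1, List.replicate_succ', hc]
    · have hres : pvAddRun runs ch = runs ++ [(ch, 1)] := by
        rw [pvAddRun, hL]; simp [hc]
      refine ⟨⟨?_, ?_⟩, ?_⟩
      · intro x hx
        rw [hres] at hx
        rcases List.mem_append.mp hx with hx | hx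
        · exact hmem x hx
        · simp at hx; subst hx; omega
      · rw [hres, List.map_append, List.isChain_append]
        refine ⟨hchain, by simp, ?_⟩
        intro x hx y hy
        rw [List.getLast?_map, hL] at hx
        simp at hx hy
        subst hx; subst hy; exact hc
      · rw [hres]; simp [pvDecode]

theorem pvDecode_head (ch : Char) (rest : List (Char × Int))
    (hmem : ∀ x ∈ rest, 1 ≤ x.2)
    (hchain : List.IsChain (fun a b => a ≠ b) (ch :: rest.map Prod.fst))
    (hlen : 0 < (pvDecode rest).length) :
    (pvDecode rest).getD 0 ' ' ≠ ch := by
  match rest with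
  | [] => simp [pvDecode] at hlen
  | (ch2, k2) :: rest2 =>
    have hk2 : 1 ≤ k2 := hmem (ch2, k2) (by simp)
    have hne : ch ≠ ch2 := by
      simpa using (List.isChain_cons_cons.mp hchain).1
    have : (pvDecode ((ch2, k2) :: rest2)).getD 0 ' ' = ch2 := by
      simp only [pvDecode, List.flatMap_cons]
      rw [List.getD_append _ _ _ _ (by simp; omega)]
      exact List.getD_replicate _ (by omega)
    rw [this]
    exact fun h => hne h.symm

theorem pvRunAt_lift (ch : Char) (kn : Nat) (m2 : List Char) (p s e : Nat)
    (hk : 1 ≤ kn)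
    (hhead : m2.getD 0 ' ' ≠ ch)
    (hrun : pvRunAt m2 p s e) :
    pvRunAt (List.replicate kn ch ++ m2) (kn + p) (kn + s) (kn + e) := by
  obtain ⟨hs, hp, he, hin, hl, hr⟩ := hrun
  have hgm : ∀ j : Nat, (List.replicate kn ch ++ m2).getD (kn + j) ' ' = m2.getD j ' ' := by
    intro j
    rw [List.getD_append_right _ _ _ _ (by simp)]
    have hj : kn + j - (List.replicate kn ch).length = j := by simp
    rw [hj]
  refine ⟨by omega, by omega, by simp; omega, ?_, ?_, ?_⟩
  · intro i hi1 hi2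
    have : i = kn + (i - kn) := by omega
    rw [this, hgm, hgm]
    exact hin _ (by omega) (by omega)
  · right
    rw [hgm]
    rcases Nat.eq_zero_or_pos s with rfl | hspos
    · have h0 : (List.replicate kn ch ++ m2).getD (kn + 0 - 1) ' ' = ch := by
        rw [List.getD_append _ _ _ _ (by simp; omega)]
        exact List.getD_replicate _ (by omega)
      rw [h0]
      have := hin 0 (by omega) (by omega)
      rw [← this]
      exact fun hh => hhead hh.symm
    · have : kn + s - 1 = kn + (s - 1) := by omega
      rw [this, hgm]
      rcases hl with h0 | hne
      · omega
      · exact hne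
  · rcases hr with h0 | hne
    · left; simp; omega
    · right
      have : kn + e + 1 = kn + (e + 1) := by omega
      rw [this, hgm, hgm]
      exact hne

theorem pvSel_spec (runs : List (Char × Int)) (start row col : Int) (p : Nat)
    (hinv : pvInv runs) (hrow : row = start + (p : Int)) (hp : p < (pvDecode runs).length) :
    ∃ s e : Nat, pvSelRuns row col runs start = [start + (s : Int), col, start + (e : Int), col] ∧
      pvRunAt (pvDecode runs) p s e := by
  induction runs generalizing start p with
  | nil => simp [pvDecode] at hp
  | cons hd rest ih =>
    obtain ⟨ch, k⟩ := hd
    obtain ⟨hmem, hchain⟩ := hinv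
    have hk : 1 ≤ k := hmem (ch, k) (by simp)
    have hkc : ((k.toNat : Int)) = k := by omega
    have hinv' : pvInv rest := ⟨fun x hx => hmem x (by simp [hx]), by
      simpa using hchain.tail⟩
    have hdec : pvDecode ((ch, k) :: rest) = List.replicate k.toNat ch ++ pvDecode rest := by
      simp [pvDecode]
    have hlen : (pvDecode ((ch, k) :: rest)).length = k.toNat + (pvDecode rest).length := by
      simp [hdec]
    by_cases hcase : p < k.toNat
    · refine ⟨0, k.toNat - 1, ?_, ?_, ?_, ?_, ?_, ?_, ?_⟩
      · rw [pvSelRuns, if_pos (by omega)]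
        have h1 : start + ((0 : Nat) : Int) = start := by omega
        have h2 : start + k - 1 = start + ((k.toNat - 1 : Nat) : Int) := by omega
        rw [h1, h2]
      · omega
      · omega
      · omega
      · intro i hi1 hi2
        rw [hdec, List.getD_append _ _ _ _ (by simp; omega),
            List.getD_append _ _ _ _ (by simp; omega),
            List.getD_replicate _ (by omega), List.getD_replicate _ (by omega)]
      · left; rfl
      · rcases Nat.eq_zero_or_pos (pvDecode rest).length with hz | hpos
        · left; omega
        · right
          rw [hdec]
          have h1 : k.toNat - 1 + 1 = k.toNat := by omega
          rw [h1, List.getD_append_right _ _ _ _ (by simp),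
              List.getD_append _ _ _ _ (by simp; omega),
              List.getD_replicate _ (by omega)]
          simp only [List.length_replicate, Nat.sub_self]
          exact pvDecode_head ch rest hinv'.1 (by simpa using hchain) hpos
    · have hplen : p - k.toNat < (pvDecode rest).length := by omega
      obtain ⟨s', e', hres, hrun⟩ := ih (start + k) (p - k.toNat) hinv' (by omega) hplen
      refine ⟨k.toNat + s', k.toNat + e', ?_, ?_⟩
      · rw [pvSelRuns, if_neg (by omega), hres]
        have h1 : start + k + (s' : Int) = start + ((k.toNat + s' : Nat) : Int) := by push_cast; omega
        have h2 : start + k + (e' : Int) = start + ((k.toNat + e' : Nat) : Int) := by push_cast; omega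
        rw [h1, h2]
      · rw [hdec]
        have hp' : p = k.toNat + (p - k.toNat) := by omega
        rw [hp']
        exact pvRunAt_lift ch k.toNat (pvDecode rest) _ s' e' (by omega)
          (pvDecode_head ch rest hinv'.1 (by simpa using hchain)
            (by omega)) hrun


theorem pvFold_spec (l : List Char) (runs : List (Char × Int)) (h : pvInv runs) :
    pvInv (l.foldl pvAddRun runs) ∧ pvDecode (l.foldl pvAddRun runs) = pvDecode runs ++ l := by
  induction l generalizing runs with
  | nil => simpa using h
  | cons ch l ih =>
    obtain ⟨h1, h2⟩ := pvAddRun_spec runs ch h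
    obtain ⟨h3, h4⟩ := ih _ h1
    refine ⟨h3, ?_⟩
    simp [List.foldl_cons, h4, h2]

theorem pvConstruct_length (s : List Char) : (pvConstruct s).length = s.length / 6 := by
  have key : ∀ m : Nat,
      (((List.range m).foldl
        (fun (st : List (List Char) × List Char) i =>
          if i % 6 == 0 then (st.1, [s.getD i ' '])
          else if i % 6 == 5 then (st.1 ++ [st.2 ++ [s.getD i ' ']], st.2 ++ [s.getD i ' '])
          else (st.1, st.2 ++ [s.getD i ' '])) ([], [])).1).length = m / 6 := by
    intro m
    induction m with
    | zero => simp
    | succ m ih =>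
      rw [List.range_succ, List.foldl_append, List.foldl_cons, List.foldl_nil]
      by_cases h0 : m % 6 == 0
      · rw [if_pos h0]
        simp only at ih ⊢
        rw [ih]
        simp at h0
        omega
      · rw [if_neg h0]
        by_cases h5 : m % 6 == 5
        · rw [if_pos h5]
          simp only [List.length_append, List.length_cons, List.length_nil] at ih ⊢
          rw [ih]
          simp at h5
          omega
        · rw [if_neg h5]
          simp only at ih ⊢
          rw [ih]
          simp at h0 h5
          omega
  exact key s.length

-- ===== VERDICT (by name: the statement is the Claim_ definition above) =====
theorem find_vehicle_vertical_spec : Claim_equal_find_vehicle_vertical := by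
  intro index bs _ hpre
  unfold Spec_find_vehicle_vertical
  obtain ⟨hgt, hilt, hpos⟩ := hpre
  simp only [find_vehicle_vertical, find_vehicle_vertical_alt]
  set board := pvConstruct bs.toList with hboard
  set row := Int.tdiv index 6 with hrowdef
  set col := PySem.Int.mod index 6 with hcoldef
  set t := pvCell board row col with htdef
  set n := board.length with hndef
  have hnval : n = bs.toList.length / 6 := by rw [hndef, hboard]; exact pvConstruct_length bs.toList
  have hrowb : 0 ≤ row ∧ row < (n : Int) := by
    rcases (by omega : 0 ≤ index ∨ index < 0) with h0 | h0
    · have he : row = index / 6 := by rw [hrowdef]; exact Int.tdiv_eq_ediv_of_nonneg h0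
      rw [he, hnval]
      omega
    · have he : row = 0 := by rw [hrowdef]; interval_cases index <;> decide
      rw [he, hnval]
      omega
  obtain ⟨hrow0, hrown⟩ := hrowb
  have hrowcast : ((row.toNat : Nat) : Int) = row := by omega
  obtain ⟨hu1, hu2, hu3, hu4⟩ := pvUp_spec board col t row
  obtain ⟨hd1, hd2, hd3, hd4⟩ := pvDown_spec board (n : Int) col t row
  set up := pvUp board col t row with hupdef
  set down := pvDown board (n : Int) col t row with hdowndef
  have hup_ge : -1 ≤ up := hu2 (by omega)
  have hdown_le : down ≤ (n : Int) := hd2 (by omega)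
  have hcellrow : pvCell board row col = t := rfl
  have hdown_gt : row < down := by
    by_contra h
    have hdr : down = row := by omega
    exact hd3 (by rw [hdr]; exact hrown) (by rw [hdr])
  have hifu : ¬(0 ≤ up ∧ pvCell board up col = t) := fun hh => hu3 hh.1 hh.2
  have hifd : ¬(down < (n : Int) ∧ pvCell board down col = t) := fun hh => hd3 hh.1 hh.2
  rw [if_neg hifu, if_neg hifd]
  clear_value board row col t n up down
  set column := (List.range n).map (fun r => pvCell board (Int.ofNat r) col) with hcolumn
  have hinv0 : pvInv ([] : List (Char × Int)) := ⟨by simp, by simp⟩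
  obtain ⟨hinvr, hdec⟩ := pvFold_spec column [] hinv0
  have hdec' : pvDecode (column.foldl pvAddRun []) = column := by
    rw [hdec]; simp [pvDecode]
  have hcollen : column.length = n := by rw [hcolumn]; simp
  have hcolget : ∀ i : Nat, i < n → column.getD i ' ' = pvCell board (i : Int) col := by
    intro i hi
    rw [hcolumn, List.getD_eq_getElem?_getD, List.getElem?_map, List.getElem?_range hi]
    rfl
  have hplt : row.toNat < n := by omega
  obtain ⟨sB, eB, hres, hrunB⟩ := pvSel_spec (column.foldl pvAddRun []) 0 row col row.toNat
    hinvr (by omega) (by rw [hdec', hcollen]; exact hplt)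
  rw [hres]
  have hcellrowN : pvCell board ((row.toNat : Nat) : Int) col = t := by rw [hrowcast]; exact hcellrow
  have hup_lt : up < row := by
    by_contra h
    have hur : up = row := by omega
    exact hu3 (by omega) (by rw [hur]; exact htdef.symm)
  have hc1 : (up + 1).toNat ≤ row.toNat := by omega
  have hc2 : row.toNat ≤ (down - 1).toNat := by omega
  have hc3 : (down - 1).toNat < column.length := by rw [hcollen]; omega
  have hrunA : pvRunAt column row.toNat (up + 1).toNat (down - 1).toNat := by
    refine ⟨hc1, hc2, hc3, ?_, ?_, ?_⟩
    · intro i hi1 hi2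
      rw [hcolget i (by omega), hcolget row.toNat (by omega), hcellrowN]
      by_cases hcase : (i : Int) ≤ row
      · exact hu4 (i : Int) (by omega) hcase
      · exact hd4 (i : Int) (by omega) (by omega)
    · by_cases hc : up + 1 = 0
      · left; omega
      · right
        have h0 : 0 ≤ up := by omega
        have he : ((up + 1).toNat - 1 : Nat) = up.toNat := by omega
        have hucast : ((up.toNat : Nat) : Int) = up := by omega
        rw [he, hcolget up.toNat (by omega), hcolget row.toNat (by omega), hcellrowN, hucast]
        exact hu3 h0
    · by_cases hc : down = (n : Int)
      · left; rw [hcollen]; omega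
      · right
        have he : ((down - 1).toNat + 1 : Nat) = down.toNat := by omega
        have hdcast : ((down.toNat : Nat) : Int) = down := by omega
        rw [he, hcolget down.toNat (by omega), hcolget row.toNat (by omega), hcellrowN, hdcast]
        exact hd3 (by omega)
  have huniq := pvRunAt_unique hrunA (hdec' ▸ hrunB)
  have hseq : up + 1 = 0 + (sB : Int) := by omega
  have heeq : down - 1 = 0 + (eB : Int) := by omega
  rw [hseq, heeq]
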